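-- pv_equiv track=rewrite | github.com/Captniz/SongsterrToMusicXML | Converter.py | _infer_string_and_fret_from_midi
-- ===== SOURCE A (Python) =====
-- def _infer_string_and_fret_from_midi(midi_value: int, tuning: list[int]) -> tuple[int, int] | None:
--     candidates: list[tuple[int, int]] = []
--     for string_index, open_string_midi in enumerate(tuning):
--         fret = midi_value - int(open_string_midi)
--         if fret >= 0:
--             candidates.append((string_index, fret))
--
--     if not candidates:
--         return None
--
--     candidates.sort(key=lambda item: (item[1], item[0]))
--     return candidates[0]
-- ===== SOURCE B (Python) =====
-- def _infer_string_and_fret_from_midi(midi_value: int, tuning: list[int]) -> tuple[int, int] | None: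
--     best = None
--     for string_index, open_string_midi in enumerate(tuning):
--         fret = midi_value - int(open_string_midi)
--         if fret < 0:
--             continue
--         if best is None or (fret, string_index) < (best[1], best[0]):
--             best = (string_index, fret)
--     return best
-- ===== Notes on version B (the rewrite author's own statement) =====
-- stated objective: faster
-- what changed: Replaces build-candidates-then-sort-and-index with a single linear pass that keeps the running lexicographic (fret, string_index) minimum.
import Mathlib
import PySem

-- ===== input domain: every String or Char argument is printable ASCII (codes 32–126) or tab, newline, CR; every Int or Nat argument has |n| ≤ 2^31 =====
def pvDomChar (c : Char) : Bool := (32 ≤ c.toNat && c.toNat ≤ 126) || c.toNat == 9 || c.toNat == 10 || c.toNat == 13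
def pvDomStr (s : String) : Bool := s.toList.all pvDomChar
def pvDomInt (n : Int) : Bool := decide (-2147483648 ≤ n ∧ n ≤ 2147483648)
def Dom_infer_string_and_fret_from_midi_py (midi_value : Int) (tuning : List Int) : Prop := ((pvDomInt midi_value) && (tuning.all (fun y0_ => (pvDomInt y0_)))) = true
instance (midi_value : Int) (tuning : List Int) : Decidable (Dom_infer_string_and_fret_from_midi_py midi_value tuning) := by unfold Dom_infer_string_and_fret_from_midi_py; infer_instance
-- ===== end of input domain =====

-- B replaces A's build-all-candidates-then-insertion-sort-and-take-[0] (O(n^2)) with one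
-- linear pass keeping the running (fret, string_index)-lexicographic minimum.

-- ===== PORT A =====
-- literal port: collect (string_index, fret) for fret >= 0, sort by (fret, string_index), return [0]
def infer_string_and_fret_from_midi_py (midi_value : Int) (tuning : List Int) : Option (Int × Int) :=
  let candidates : List (Int × Int) :=
    (PySem.List.enumerate tuning).foldl (fun acc p =>
      let fret := midi_value - p.2
      if fret ≥ 0 then acc ++ [(p.1, fret)] else acc) []
  if candidates = [] then none
  else PySem.List.pyGet? (PySem.List.sorted2 candidates (fun item => item.2) (fun item => item.1)) 0

-- ===== PORT B =====
-- literal port of Source B: single pass, best := (string_index, fret) whenever (fret, idx) is strictly smaller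
def infer_string_and_fret_from_midi_py_alt (midi_value : Int) (tuning : List Int) : Option (Int × Int) :=
  (PySem.List.enumerate tuning).foldl (fun best p =>
    let fret := midi_value - p.2
    if fret < 0 then best
    else
      match best with
      | none => some (p.1, fret)
      | some b => if fret < b.2 ∨ (fret = b.2 ∧ p.1 < b.1) then some (p.1, fret) else best) none

-- ===== PRECONDITION & SPEC =====
def Spec_infer_string_and_fret_from_midi_py (midi_value : Int) (tuning : List Int) (out : Option (Int × Int)) : Prop := out = infer_string_and_fret_from_midi_py_alt midi_value tuning
instance (midi_value : Int) (tuning : List Int) (out : Option (Int × Int)) : Decidable (Spec_infer_string_and_fret_from_midi_py midi_value tuning out) := by unfold Spec_infer_string_and_fret_from_midi_py; infer_instance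

-- ===== CLAIM (what is proved, stated in full; the proofs are below) =====
def Claim_equal_infer_string_and_fret_from_midi_py : Prop := ∀ (midi_value : Int) (tuning : List Int), Dom_infer_string_and_fret_from_midi_py midi_value tuning → Spec_infer_string_and_fret_from_midi_py midi_value tuning (infer_string_and_fret_from_midi_py midi_value tuning)

-- ===== LEMMAS AND PROOFS =====

-- the running-minimum step used to characterise both sides
def pvMinStep (before : Int × Int → Int × Int → Bool) (m : Option (Int × Int)) (x : Int × Int) : Option (Int × Int) :=
  match m with
  | none => some x
  | some b => if before x b then some x else some b

-- head of a single insertBy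
theorem head_insertBy (before : Int × Int → Int × Int → Bool) (x : Int × Int) (acc : List (Int × Int)) :
    (PySem.List.insertBy before x acc).head? = pvMinStep before acc.head? x := by
  cases acc with
  | nil => rfl
  | cons y ys =>
    show (if before x y then x :: y :: ys else y :: PySem.List.insertBy before x ys).head? = _
    by_cases h : before x y = true <;> simp [pvMinStep, h]

-- head of the insertion-sort fold is the running minimum
theorem head_foldl_insertBy (before : Int × Int → Int × Int → Bool) (xs acc : List (Int × Int)) :
    (xs.foldl (fun a x => PySem.List.insertBy before x a) acc).head? = xs.foldl (pvMinStep before) acc.head? := by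
  induction xs generalizing acc with
  | nil => rfl
  | cons x t ih => simp only [List.foldl_cons, ih, head_insertBy]

-- the candidate selector
def pvCand (midi_value : Int) (p : Int × Int) : Option (Int × Int) :=
  if midi_value - p.2 ≥ 0 then some (p.1, midi_value - p.2) else none

-- A's candidates loop builds acc ++ filterMap
theorem candidates_eq_filterMap (midi_value : Int) (xs : List (Int × Int)) (acc : List (Int × Int)) :
    xs.foldl (fun acc p =>
      let fret := midi_value - p.2
      if fret ≥ 0 then acc ++ [(p.1, fret)] else acc) acc = acc ++ xs.filterMap (pvCand midi_value) := by
  induction xs generalizing acc with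
  | nil => simp
  | cons x t ih =>
    simp only [List.foldl_cons, List.filterMap_cons, pvCand]
    split
    · rw [ih]; simp_all [pvCand]
    · rw [ih]; simp_all [pvCand]

-- sorted2's comparator agrees with B's strict lexicographic test on Int pairs
theorem before_eq (a b : Int × Int) :
    (decide (a.2 < b.2) || !decide (b.2 < a.2) && decide (a.1 < b.1))
      = decide (a.2 < b.2 ∨ (a.2 = b.2 ∧ a.1 < b.1)) := by
  rw [Bool.eq_iff_iff]
  simp only [Bool.or_eq_true, Bool.and_eq_true, Bool.not_eq_true', decide_eq_true_iff, decide_eq_false_iff_not]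
  omega

-- B's fold over enumerate is the running minimum over the filterMapped candidates
theorem alt_fold_eq (midi_value : Int) (xs : List (Int × Int)) (b0 : Option (Int × Int)) :
    xs.foldl (fun best p =>
      let fret := midi_value - p.2
      if fret < 0 then best
      else
        match best with
        | none => some (p.1, fret)
        | some b => if fret < b.2 ∨ (fret = b.2 ∧ p.1 < b.1) then some (p.1, fret) else best) b0
    = (xs.filterMap (pvCand midi_value)).foldl
        (pvMinStep (fun a b => decide (a.2 < b.2) || !decide (b.2 < a.2) && decide (a.1 < b.1))) b0 := by
  induction xs generalizing b0 with
  | nil => rfl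
  | cons x t ih =>
    simp only [List.foldl_cons, List.filterMap_cons, pvCand]
    by_cases h : midi_value - x.2 ≥ 0
    · simp only [if_pos h, if_neg (by omega : ¬ midi_value - x.2 < 0), List.foldl_cons]
      rw [ih]
      congr 1
      cases b0 with
      | none => rfl
      | some b => simp [pvMinStep, before_eq (x.1, midi_value - x.2) b]
    · simp only [if_neg h, if_pos (by omega : midi_value - x.2 < 0)]
      exact ih b0

-- ===== VERDICT (by name: the statement is the Claim_ definition above) =====
theorem infer_string_and_fret_from_midi_py_spec : Claim_equal_infer_string_and_fret_from_midi_py := by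
  intro midi_value tuning _
  show infer_string_and_fret_from_midi_py midi_value tuning = infer_string_and_fret_from_midi_py_alt midi_value tuning
  unfold infer_string_and_fret_from_midi_py infer_string_and_fret_from_midi_py_alt
  rw [alt_fold_eq, candidates_eq_filterMap]
  simp only [List.nil_append]
  set c := (PySem.List.enumerate tuning).filterMap (pvCand midi_value) with hc
  by_cases h : c = []
  · simp [h]
  · rw [if_neg h]
    rw [PySem.List.pyGet?_zero]
    rw [← List.head?_eq_getElem?]
    show (PySem.List.sorted2 c (fun item => item.2) (fun item => item.1)).head? = _
    rw [show PySem.List.sorted2 c (fun item => item.2) (fun item => item.1)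
        = c.foldl (fun a x => PySem.List.insertBy
            (fun a b => decide (a.2 < b.2) || !decide (b.2 < a.2) && decide (a.1 < b.1)) x a) [] from rfl]
    rw [head_foldl_insertBy]
    rfl
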